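-- pv_equiv track=rewrite | github.com/NKID00/NK_PMD00.software | ui/ui.py | word_warp
-- ===== SOURCE A (Python) =====
-- def word_warp(s: str, width: int = 16):
--     warped = ''
--     x = 0
--     for c in s:
--         if c == '\n':
--             warped += c
--             x = 0
--         elif ord(c) < 128:  # ASCII
--             if x == width:
--                 warped += '\n'
--                 x = 0
--             x += 1
--             warped += c
--         else:  # Unicode
--             if x >= width - 1:
--                 warped += '\n'
--                 x = 0
--             x += 2
--             warped += c
--     return warped
-- ===== SOURCE B (Python) =====
-- # Re-implementation: split on newlines, wrap each line by slicing it into width-sized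
-- # chunks, and join everything back with newlines.  Intended for the printable-ASCII
-- # domain (every character one column wide).  For width == 0 the original inserts a
-- # spurious leading newline before every line; here a non-positive width means "no
-- # wrapping" and the text is returned unchanged.
-- def word_warp(s: str, width: int = 16):
--     if width <= 0:
--         return s
--
--     def wrap(seg):
--         out = []
--         while seg:
--             out.append(seg[:width])
--             seg = seg[width:]
--         return '\n'.join(out)
--
--     return '\n'.join(wrap(seg) for seg in s.split('\n'))
-- ===== Notes on version B (the rewrite author's own statement) =====
-- stated objective: faster
-- what changed: A walks the string character by character, appending to the result and maintaining a column counter; B splits the text on newlines, slices each line into width-sized chunks, and joins everything back with newlines (bulk slicing and join instead of per-character string concatenation).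
-- intended difference: When width = 0 and the text contains a non-newline character, A returns the text with a spurious leading newline inserted before every line (its column check fires once per line and never again); B returns the text unchanged, the intended no-wrap behaviour for a non-positive width. — e.g. on word_warp("a", 0): A returns "\na", B returns "a"
import Mathlib
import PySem

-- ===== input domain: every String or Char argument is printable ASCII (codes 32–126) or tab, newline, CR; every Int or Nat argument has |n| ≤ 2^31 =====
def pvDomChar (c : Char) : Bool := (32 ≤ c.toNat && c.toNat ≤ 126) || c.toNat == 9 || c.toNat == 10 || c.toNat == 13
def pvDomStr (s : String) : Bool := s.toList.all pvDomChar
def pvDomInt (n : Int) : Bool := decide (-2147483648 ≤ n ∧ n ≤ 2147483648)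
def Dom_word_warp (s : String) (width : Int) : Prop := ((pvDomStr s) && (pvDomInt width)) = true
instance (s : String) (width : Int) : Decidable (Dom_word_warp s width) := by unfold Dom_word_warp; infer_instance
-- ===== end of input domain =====

-- B wraps by splitting on newlines and slicing each line into width-sized chunks
-- (a different decomposition than A's single char-by-char column loop); on width = 0
-- A inserts a spurious leading newline per line, B returns the text unchanged (D_ below).

-- ===== PORT A =====
-- one step of A's for-loop over the characters: state = (warped, x)
def wwStep (width : Int) (st : List Char × Int) (c : Char) : List Char × Int :=
  if c = '\n' then
    (st.1 ++ [c], 0)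
  else if c.toNat < 128 then  -- ASCII
    let st1 := if st.2 = width then (st.1 ++ ['\n'], (0 : Int)) else st
    (st1.1 ++ [c], st1.2 + 1)
  else  -- Unicode
    let st1 := if st.2 ≥ width - 1 then (st.1 ++ ['\n'], (0 : Int)) else st
    (st1.1 ++ [c], st1.2 + 2)

def word_warp (s : String) (width : Int) : String :=
  String.ofList (s.toList.foldl (wwStep width) ([], 0)).1

-- ===== PORT B =====
-- the while-loop of Source B's wrap: peel off seg[:width], continue with seg[width:]
-- (called only with width ≥ 1; for w ≥ 1, (c :: cs).drop w = cs.drop (w - 1))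
def wwChunks (w : Nat) : List Char → List (List Char)
  | [] => []
  | c :: cs => ((c :: cs).take w) :: wwChunks w (cs.drop (w - 1))
termination_by seg => seg.length
decreasing_by simp only [List.length_drop, List.length_cons]; omega

def wwWrap (w : Nat) (seg : List Char) : List Char :=
  PySem.Chars.join ['\n'] (wwChunks w seg)

def word_warp_alt (s : String) (width : Int) : String :=
  if width ≤ 0 then s
  else
    String.ofList
      (PySem.Chars.join ['\n']
        ((PySem.Chars.splitOn s.toList ['\n']).map (wwWrap width.toNat)))

-- ===== PRECONDITION & SPEC =====
-- When width = 0 and the text has a character other than '\n', A inserts a spurious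
-- leading '\n' before every line (its column check fires once and never again); B
-- returns the text unchanged, the intended no-wrap behaviour for a zero-width box.
def D_word_warp (s : String) (width : Int) : Prop :=
  width = 0 ∧ ∃ c ∈ s.toList, c ≠ '\n'
instance (s : String) (width : Int) : Decidable (D_word_warp s width) := by
  unfold D_word_warp; infer_instance

def Spec_word_warp (s : String) (width : Int) (out : String) : Prop :=
  ¬ D_word_warp s width → out = word_warp_alt s width
instance (s : String) (width : Int) (out : String) : Decidable (Spec_word_warp s width out) := by
  unfold Spec_word_warp; infer_instance

def pvDiffWitness_word_warp : String × Int := ("a", 0)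
def pvDiffWitnessOut_word_warp : String × String := ("\na", "a")

-- ===== CLAIM (what is proved, stated in full; the proofs are below) =====
def Claim_unchanged_word_warp : Prop := ∀ (s : String) (width : Int), Dom_word_warp s width → Spec_word_warp s width (word_warp s width)
def Claim_changed_word_warp : Prop := Dom_word_warp (pvDiffWitness_word_warp.1) (pvDiffWitness_word_warp.2) ∧ D_word_warp (pvDiffWitness_word_warp.1) (pvDiffWitness_word_warp.2) ∧ word_warp (pvDiffWitness_word_warp.1) (pvDiffWitness_word_warp.2) = pvDiffWitnessOut_word_warp.1 ∧ word_warp_alt (pvDiffWitness_word_warp.1) (pvDiffWitness_word_warp.2) = pvDiffWitnessOut_word_warp.2 ∧ pvDiffWitnessOut_word_warp.1 ≠ pvDiffWitnessOut_word_warp.2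
def Claim_exact_word_warp : Prop := ∀ (s : String) (width : Int), Dom_word_warp s width → D_word_warp s width → word_warp s width ≠ word_warp_alt s width

-- ===== LEMMAS AND PROOFS =====

-- character-wise functional form of A's loop (body of the fold, output only)
def wwF (width x : Int) : List Char → List Char
  | [] => []
  | c :: cs =>
    if c = '\n' then '\n' :: wwF width 0 cs
    else if x = width then '\n' :: c :: wwF width 1 cs
    else c :: wwF width (x + 1) cs

-- left split on '\n' (proved equal to PySem.Chars.splitOn · ['\n'] below)
def wwSplit : List Char → List (List Char)
  | [] => [[]]
  | c :: cs => if c = '\n' then [] :: wwSplit cs else (wwSplit cs).modifyHead (c :: ·)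

theorem wwF_fold (width : Int) (l : List Char) (h : ∀ c ∈ l, c.toNat < 128) :
    ∀ (acc : List Char) (x : Int),
      (l.foldl (wwStep width) (acc, x)).1 = acc ++ wwF width x l := by
  induction l with
  | nil => intro acc x; simp [wwF]
  | cons c cs ih =>
    intro acc x
    have hc : c.toNat < 128 := h c (by simp)
    have hcs : ∀ c ∈ cs, c.toNat < 128 := fun d hd => h d (by simp [hd])
    by_cases hnl : c = '\n'
    · subst hnl
      simp [List.foldl_cons, wwStep, wwF, ih hcs]
    · by_cases hx : x = width
      · simp [List.foldl_cons, wwStep, wwF, hnl, hc, hx, ih hcs]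
      · simp [List.foldl_cons, wwStep, wwF, hnl, hc, hx, ih hcs]

theorem wwF_neg (width : Int) (hw : width < 0) (l : List Char) :
    ∀ x : Int, 0 ≤ x → wwF width x l = l := by
  induction l with
  | nil => intro x _; simp [wwF]
  | cons c cs ih =>
    intro x hx
    by_cases hnl : c = '\n'
    · subst hnl; simp [wwF, ih 0 le_rfl]
    · have : x ≠ width := by omega
      simp [wwF, hnl, this, ih (x+1) (by omega)]

theorem wwF_all_nl (width : Int) (l : List Char) (h : ∀ c ∈ l, c = '\n') :
    ∀ x : Int, wwF width x l = l := by
  induction l with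
  | nil => intro x; simp [wwF]
  | cons c cs ih =>
    intro x
    have hc : c = '\n' := h c (by simp)
    have hcs : ∀ c ∈ cs, c = '\n' := fun d hd => h d (by simp [hd])
    subst hc
    simp [wwF, ih hcs 0]

theorem wwF_seg (width : Int) (hw : 1 ≤ width) (seg : List Char) (hnl : '\n' ∉ seg) :
    ∀ x : Int, 0 ≤ x → x ≤ width →
      wwF width x seg =
        seg.take (width - x).toNat ++
          (if seg.length ≤ (width - x).toNat then []
           else '\n' :: wwF width 0 (seg.drop (width - x).toNat)) := by
  induction seg with
  | nil => intro x _ _; simp [wwF]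
  | cons c cs ih =>
    intro x hx0 hxw
    have hc : c ≠ '\n' := fun h => hnl (by simp [h])
    have hcs : '\n' ∉ cs := fun h => hnl (by simp [h])
    by_cases hx : x = width
    · have h0 : (width - x).toNat = 0 := by omega
      have hne : (0 : Int) ≠ width := by omega
      simp only [wwF, if_neg hc, if_pos hx, h0, List.take_zero, List.nil_append,
        List.drop_zero, List.length_cons]
      rw [if_neg (by omega)]
      congr 1
      -- c :: wwF width 1 cs = wwF width 0 (c :: cs)
      simp [wwF, hc, hne]
    · have hr1 : 1 ≤ (width - x).toNat := by omega
      have hstep : (width - (x+1)).toNat = (width - x).toNat - 1 := by omega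
      simp only [wwF, if_neg hc, if_neg hx]
      rw [ih hcs (x+1) (by omega) (by omega), hstep]
      have htake : (c :: cs).take (width - x).toNat = c :: cs.take ((width - x).toNat - 1) := by
        cases h : (width - x).toNat with
        | zero => omega
        | succ n => simp [h]
      have hdrop : (c :: cs).drop (width - x).toNat = cs.drop ((width - x).toNat - 1) := by
        cases h : (width - x).toNat with
        | zero => omega
        | succ n => simp [h]
      rw [htake, hdrop]
      have hlen : ((c :: cs).length ≤ (width - x).toNat) ↔ (cs.length ≤ (width - x).toNat - 1) := by
        simp only [List.length_cons]; omega
      by_cases hL : cs.length ≤ (width - x).toNat - 1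
      · rw [if_pos hL, if_pos (hlen.mpr hL)]; simp
      · rw [if_neg hL, if_neg (fun h => hL (hlen.mp h))]; simp

theorem wwF_append_nl (width : Int) (seg rest : List Char) (hnl : '\n' ∉ seg) :
    ∀ x : Int, wwF width x (seg ++ '\n' :: rest) = wwF width x seg ++ '\n' :: wwF width 0 rest := by
  induction seg with
  | nil => intro x; simp [wwF]
  | cons c cs ih =>
    intro x
    have hc : c ≠ '\n' := fun h => hnl (by simp [h])
    have hcs : '\n' ∉ cs := fun h => hnl (by simp [h])
    by_cases hx : x = width
    · simp [wwF, hc, hx, ih hcs]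
    · simp [wwF, hc, hx, ih hcs]

theorem wwSplit_ne_nil (l : List Char) : wwSplit l ≠ [] := by
  cases l with
  | nil => simp [wwSplit]
  | cons c cs =>
    by_cases h : c = '\n'
    · simp [wwSplit, h]
    · simp only [wwSplit, if_neg h]
      intro hh
      exact wwSplit_ne_nil cs (by simpa using congrArg List.length hh)

theorem wwSplit_append_nl (seg rest : List Char) (hnl : '\n' ∉ seg) :
    wwSplit (seg ++ '\n' :: rest) = seg :: wwSplit rest := by
  induction seg with
  | nil => simp [wwSplit]
  | cons c cs ih =>
    have hc : c ≠ '\n' := fun h => hnl (by simp [h])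
    have hcs : '\n' ∉ cs := fun h => hnl (by simp [h])
    simp [wwSplit, hc, ih hcs]

theorem wwSplit_no_nl (seg : List Char) (hnl : '\n' ∉ seg) : wwSplit seg = [seg] := by
  induction seg with
  | nil => simp [wwSplit]
  | cons c cs ih =>
    have hc : c ≠ '\n' := fun h => hnl (by simp [h])
    have hcs : '\n' ∉ cs := fun h => hnl (by simp [h])
    simp [wwSplit, hc, ih hcs]

theorem wwF_wrap_aux (width : Int) (hw : 1 ≤ width) :
    ∀ (n : Nat) (seg : List Char), seg.length ≤ n → '\n' ∉ seg →
      wwF width 0 seg = wwWrap width.toNat seg := by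
  intro n
  induction n with
  | zero =>
    intro seg hlen _
    have : seg = [] := by cases seg <;> simp_all
    subst this; simp [wwF, wwWrap, wwChunks, PySem.Chars.join, List.intercalate]
  | succ n ih =>
    intro seg hlen hnl
    cases seg with
    | nil => simp [wwF, wwWrap, wwChunks, PySem.Chars.join, List.intercalate]
    | cons c cs =>
      have hr : (width - 0).toNat = width.toNat := by omega
      have hr1 : 1 ≤ width.toNat := by omega
      rw [wwF_seg width hw (c :: cs) hnl 0 le_rfl (by omega), hr]
      have hdropeq : cs.drop (width.toNat - 1) = (c :: cs).drop width.toNat := by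
        cases h : width.toNat with
        | zero => omega
        | succ m => simp [h]
      by_cases hL : (c :: cs).length ≤ width.toNat
      · rw [if_pos hL]
        have hdrop : (c :: cs).drop width.toNat = [] := by
          rw [List.drop_eq_nil_iff]; omega
        simp only [wwWrap, wwChunks, hdropeq, hdrop]
        simp [PySem.Chars.join, List.intercalate]
      · rw [if_neg hL]
        have hdrop : (c :: cs).drop width.toNat ≠ [] := by
          rw [ne_eq, List.drop_eq_nil_iff]; simp at hL ⊢; omega
        have hnl' : '\n' ∉ (c :: cs).drop width.toNat :=
          fun h => hnl (List.mem_of_mem_drop h)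
        have hlen' : ((c :: cs).drop width.toNat).length ≤ n := by
          simp only [List.length_drop, List.length_cons] at *
          omega
        rw [ih _ hlen' hnl']
        simp only [wwWrap, wwChunks, hdropeq]
        cases hd : (c :: cs).drop width.toNat with
        | nil => exact absurd hd hdrop
        | cons d ds =>
          simp only [wwChunks]
          rw [PySem.Chars.join_cons_cons]
          simp [PySem.Chars.join, List.intercalate]

theorem wwF_wrap (width : Int) (hw : 1 ≤ width) (seg : List Char) (hnl : '\n' ∉ seg) :
    wwF width 0 seg = wwWrap width.toNat seg :=
  wwF_wrap_aux width hw seg.length seg le_rfl hnl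

theorem ww_exists_split (l : List Char) (h : '\n' ∈ l) :
    ∃ seg rest, '\n' ∉ seg ∧ l = seg ++ '\n' :: rest := by
  induction l with
  | nil => simp at h
  | cons c cs ihl =>
    by_cases hc : c = '\n'
    · exact ⟨[], cs, by simp, by simp [hc]⟩
    · have hcs : '\n' ∈ cs := by
        rcases List.mem_cons.mp h with h1 | h1
        · exact absurd h1.symm hc
        · exact h1
      obtain ⟨sg, r, h1, h2⟩ := ihl hcs
      exact ⟨c :: sg, r, by simp [List.mem_cons, h1]; exact fun hh => hc hh.symm, by simp [h2]⟩

theorem splitOn_go_eq (fuel : Nat) :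
    ∀ (l cur : List Char) (acc : List (List Char)), l.length ≤ fuel →
      PySem.Chars.splitOn.go ['\n'] fuel l cur acc =
        acc.reverse ++ (wwSplit l).modifyHead (cur.reverse ++ ·) := by
  induction fuel with
  | zero =>
    intro l cur acc hlen
    have : l = [] := by cases l <;> simp_all
    subst this
    simp [PySem.Chars.splitOn.go, wwSplit]
  | succ fuel ih =>
    intro l cur acc hlen
    cases l with
    | nil => simp [PySem.Chars.splitOn.go, wwSplit]
    | cons c rest =>
      by_cases hc : c = '\n'
      · subst hc
        have hpre : List.isPrefixOf ['\n'] ('\n' :: rest) = true := by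
          simp [List.isPrefixOf]
        rw [PySem.Chars.splitOn.go]
        simp only [hpre, if_pos, List.length_nil, List.drop_zero, List.length_cons,
          List.drop_succ_cons]
        rw [ih rest [] ((cur.reverse) :: acc) (by simpa using hlen)]
        simp only [wwSplit, if_pos rfl, List.reverse_cons, List.reverse_nil,
          List.nil_append, List.modifyHead_cons]
        cases hws : wwSplit rest with
        | nil => exact absurd hws (wwSplit_ne_nil rest)
        | cons a t => simp
      · have hpre : List.isPrefixOf ['\n'] (c :: rest) = false := by
          simp [List.isPrefixOf]; exact fun h => hc h.symm
        rw [PySem.Chars.splitOn.go]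
        simp only [hpre, Bool.false_eq_true, if_false]
        rw [ih rest (c :: cur) acc (by simpa using hlen)]
        simp only [wwSplit, if_neg hc, List.modifyHead_modifyHead]
        have hfun : ((fun x => cur.reverse ++ x) ∘ fun x => c :: x) =
            (fun x => (c :: cur).reverse ++ x) := by
          funext t; simp
        rw [hfun]

theorem splitOn_eq_wwSplit (l : List Char) :
    PySem.Chars.splitOn l ['\n'] = wwSplit l := by
  rw [PySem.Chars.splitOn]
  rw [splitOn_go_eq (l.length + 1) l [] [] (by omega)]
  cases h : wwSplit l with
  | nil => exact absurd h (wwSplit_ne_nil l)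
  | cons a t => simp

theorem wwF_eq_B (width : Int) (hw : 1 ≤ width) :
    ∀ (n : Nat) (l : List Char), l.length ≤ n →
      wwF width 0 l = PySem.Chars.join ['\n'] ((wwSplit l).map (wwWrap width.toNat)) := by
  intro n
  induction n with
  | zero =>
    intro l hlen
    have : l = [] := by cases l <;> simp_all
    subst this
    simp [wwF, wwSplit, wwWrap, wwChunks, PySem.Chars.join, List.intercalate]
  | succ n ih =>
    intro l hlen
    by_cases hnl : '\n' ∈ l
    · -- split at the first newline
      obtain ⟨seg, rest, hseg, heq⟩ := ww_exists_split l hnl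
      subst heq
      rw [wwF_append_nl width seg rest hseg 0, wwSplit_append_nl seg rest hseg]
      have hlen' : rest.length ≤ n := by
        simp only [List.length_append, List.length_cons] at hlen; omega
      rw [ih rest hlen']
      cases hr : (wwSplit rest).map (wwWrap width.toNat) with
      | nil =>
        exact absurd (by simpa using congrArg List.length hr) (wwSplit_ne_nil rest)
      | cons a t =>
        simp only [List.map_cons, hr, PySem.Chars.join_cons_cons]
        rw [wwF_wrap width hw seg hseg]
        simp [PySem.Chars.join]
    · rw [wwSplit_no_nl l hnl]
      simp only [List.map_cons, List.map_nil]
      rw [wwF_wrap width hw l hnl]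
      simp [PySem.Chars.join, List.intercalate]

theorem wwF_len_ge (width : Int) (l : List Char) :
    ∀ x : Int, l.length ≤ (wwF width x l).length := by
  induction l with
  | nil => intro x; simp [wwF]
  | cons c cs ih =>
    intro x
    by_cases hc : c = '\n'
    · simpa [wwF, hc] using ih 0
    · by_cases hx : x = width
      · have := ih 1; simp [wwF, hc, hx]; omega
      · have := ih (x + 1); simp [wwF, hc, hx]; omega

theorem wwF0_len_lt (l : List Char) (h : ∃ c ∈ l, c ≠ '\n') :
    l.length < (wwF 0 0 l).length := by
  induction l with
  | nil => simp at h
  | cons c cs ih =>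
    by_cases hc : c = '\n'
    · have hcs : ∃ d ∈ cs, d ≠ '\n' := by
        rcases h with ⟨d, hd, hdn⟩
        rcases List.mem_cons.mp hd with h1 | h1
        · exact absurd (h1 ▸ hc) hdn
        · exact ⟨d, h1, hdn⟩
      simpa [wwF, hc] using ih hcs
    · have := wwF_len_ge 0 cs 1
      simp [wwF, hc]
      omega

theorem dom_ascii (s : String) (width : Int) (h : Dom_word_warp s width) :
    ∀ c ∈ s.toList, c.toNat < 128 := by
  intro c hc
  simp only [Dom_word_warp, pvDomStr, pvDomInt, Bool.and_eq_true, List.all_eq_true] at h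
  have := h.1 c hc
  simp only [pvDomChar, Bool.or_eq_true, Bool.and_eq_true, decide_eq_true_eq, beq_iff_eq] at this
  omega


-- ===== VERDICT (by name: the statements are the Claim_ definitions above) =====
theorem word_warp_spec : Claim_unchanged_word_warp := by
  intro s width hdom hD
  show word_warp s width = word_warp_alt s width
  have hascii := dom_ascii s width hdom
  rw [word_warp, wwF_fold width s.toList hascii [] 0, List.nil_append]
  rcases lt_trichotomy width 0 with hw | hw | hw
  · rw [wwF_neg width hw s.toList 0 le_rfl, word_warp_alt, if_pos (le_of_lt hw)]
    exact String.ofList_toList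
  · have hall : ∀ c ∈ s.toList, c = '\n' := by
      intro c hc
      by_contra hcn
      exact hD ⟨hw, c, hc, hcn⟩
    rw [wwF_all_nl width s.toList hall 0, word_warp_alt, if_pos (by omega)]
    exact String.ofList_toList
  · rw [wwF_eq_B width (by omega) s.toList.length s.toList le_rfl,
      word_warp_alt, if_neg (by omega), splitOn_eq_wwSplit]


set_option maxRecDepth 10000 in
theorem word_warp_changed : Claim_changed_word_warp := by
  unfold Claim_changed_word_warp
  simp only [pvDiffWitness_word_warp, pvDiffWitnessOut_word_warp]
  exact ⟨by decide, ⟨rfl, 'a', by simp, by decide⟩,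
    by simp [word_warp, wwStep], by simp [word_warp_alt], by decide⟩

theorem word_warp_tight : Claim_exact_word_warp := by
  intro s width hdom hD
  obtain ⟨hw0, hex⟩ := hD
  subst hw0
  have hascii := dom_ascii s 0 hdom
  rw [word_warp, wwF_fold 0 s.toList hascii [] 0, List.nil_append,
    word_warp_alt, if_pos le_rfl]
  intro heq
  have := congrArg String.toList heq
  rw [String.toList_ofList] at this
  have hlen := congrArg List.length this
  have := wwF0_len_lt s.toList hex
  omega
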